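-- pv_equiv track=rewrite | github.com/anasemad21/Machine-learning | problem2.py | getkMinIndex
-- ===== SOURCE A (Python) =====
-- def getkMinIndex(distance, k):
--     min_indexes = []
--     for i in range(k):
--         min_value = min(distance)
--         min_index = distance.index(min_value)
--         min_indexes.append(min_index)
--         del (distance[min_index])
--     return min_indexes
-- ===== SOURCE B (Python) =====
-- def getkMinIndex(distance, k):
--     # Sort (value, original index) pairs once, take the first k, then convert each
--     # original index to its position in the shrinking list: that position is the
--     # original index minus the number of earlier-picked indices below it, found by
--     # binary search in a sorted list of the earlier picks.
--     # Mimics A's in-place deletion of the selected elements at the end.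
--     pairs = [(v, i) for i, v in enumerate(distance)]
--     order = [i for _, i in sorted(pairs)]
--     picks = order[:k] if k > 0 else []
--     res = []
--     prev = []  # earlier picks, kept sorted
--     for p in picks:
--         lo, hi = 0, len(prev)
--         while lo < hi:
--             mid = (lo + hi) // 2
--             if prev[mid] < p:
--                 lo = mid + 1
--             else:
--                 hi = mid
--         res.append(p - lo)
--         prev.insert(lo, p)
--     for i in sorted(picks, reverse=True):  # same mutation of `distance` as A
--         del distance[i]
--     return res
-- ===== Notes on version B (the rewrite author's own statement) =====
-- stated objective: faster
-- what changed: A rescans the remaining list k times (min + index + delete per round); B sorts (value, index) pairs once, takes the first k original indices, and converts each to its position in the shrinking list via binary search over a sorted list of the earlier picks.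
-- outside the precondition, e.g. on getkMinIndex([5], 2): A raises ValueError, B returns [0]
-- crash fix: When k exceeds len(distance), A raises ValueError (min of an empty list) while B returns the shifted indices of all len(distance) elements. — e.g. on getkMinIndex([5], 2): A raises ValueError, B returns [0]
import Mathlib
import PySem

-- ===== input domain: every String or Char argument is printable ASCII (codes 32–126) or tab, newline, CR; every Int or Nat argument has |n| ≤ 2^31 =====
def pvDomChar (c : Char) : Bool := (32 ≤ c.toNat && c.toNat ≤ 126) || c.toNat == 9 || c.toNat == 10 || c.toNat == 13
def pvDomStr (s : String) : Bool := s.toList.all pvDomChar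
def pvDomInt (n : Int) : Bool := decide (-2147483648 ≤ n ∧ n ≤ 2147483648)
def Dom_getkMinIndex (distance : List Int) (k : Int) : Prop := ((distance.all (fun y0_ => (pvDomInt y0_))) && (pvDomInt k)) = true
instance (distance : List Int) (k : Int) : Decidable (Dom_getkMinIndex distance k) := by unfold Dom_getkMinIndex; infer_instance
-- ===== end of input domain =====

-- B replaces A's k rescans (min + index + delete) by one sort of (value, index) pairs
-- plus an index-shift count; equivalence is about the RETURN value — both Pythons also
-- delete the selected elements from `distance` in place (the ports model the return value only).

-- ===== PORT A =====
-- for i in range(k): min_value = min(distance); min_index = distance.index(min_value);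
-- min_indexes.append(min_index); del distance[min_index]   (state = (min_indexes, distance);
-- `del distance[i]` with the in-range index from .index is List.eraseIdx; min()/index raising
-- on the empty list is the `none` branch, excluded by Pre_)
def getkMinIndex (distance : List Int) (k : Int) : List Int :=
  ((PySem.List.pyRange 0 k 1).foldl
    (fun (st : List Int × List Int) _ =>
      match PySem.List.min? st.2 (fun x => x) with
      | none => st
      | some m =>
        match PySem.List.index? st.2 m with
        | none => st
        | some i => (st.1 ++ [(i : Int)], st.2.eraseIdx i))
    ([], distance)).1

-- ===== PORT B =====
-- the `while lo < hi` binary-search loop of Source B (prev[mid] is always in range there,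
-- so `getD … 0` is exact)
def bsearchAux (prev : List Int) (p : Int) : Nat → Nat → Nat → Nat
  | 0, lo, _ => lo
  | fuel + 1, lo, hi =>
    if lo < hi then
      let mid := (lo + hi) / 2
      if prev.getD mid 0 < p then bsearchAux prev p fuel (mid + 1) hi
      else bsearchAux prev p fuel lo mid
    else lo

def bsearch (prev : List Int) (p : Int) (lo hi : Nat) : Nat :=
  bsearchAux prev p (hi - lo) lo hi

def getkMinIndex_alt (distance : List Int) (k : Int) : List Int :=
  let pairs := (PySem.List.enumerate distance).map (fun p => (p.2, p.1))
  let order := (PySem.List.sorted2 pairs (fun p => p.1) (fun p => p.2)).map (fun p => p.2)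
  let picks := if 0 < k then PySem.List.slice order none (some k) else []
  (picks.foldl
    (fun (st : List Int × List Int) p =>
      let lo := bsearch st.2 p 0 st.2.length
      (st.1 ++ [p - (lo : Int)], PySem.List.insert st.2 (lo : Int) p))
    ([], [])).1

-- ===== PRECONDITION & SPEC =====
-- Pre_ excludes exactly the inputs where A raises ValueError: k > len(distance)
def Pre_getkMinIndex (distance : List Int) (k : Int) : Prop := k ≤ (distance.length : Int)
instance (distance : List Int) (k : Int) : Decidable (Pre_getkMinIndex distance k) := by unfold Pre_getkMinIndex; infer_instance
def pvWitness_getkMinIndex : List Int × Int := ([4, 1, 3, 1, 2], 3)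

-- When k exceeds len(distance), A raises ValueError (min of an empty list) while B returns
-- the shifted indices of all len(distance) elements.
def Raises_getkMinIndex (distance : List Int) (k : Int) : Prop := (distance.length : Int) < k
instance (distance : List Int) (k : Int) : Decidable (Raises_getkMinIndex distance k) := by unfold Raises_getkMinIndex; infer_instance
def pvRaiseWitness_getkMinIndex : List Int × Int := ([5], 2)
def pvRaiseWitnessOut_getkMinIndex : List Int := [0]

def Spec_getkMinIndex (distance : List Int) (k : Int) (out : List Int) : Prop := out = getkMinIndex_alt distance k
instance (distance : List Int) (k : Int) (out : List Int) : Decidable (Spec_getkMinIndex distance k out) := by unfold Spec_getkMinIndex; infer_instance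

-- ===== CLAIM (what is proved, stated in full; the proofs are below) =====
def Claim_equal_getkMinIndex : Prop := ∀ (distance : List Int) (k : Int), Dom_getkMinIndex distance k → Pre_getkMinIndex distance k → Spec_getkMinIndex distance k (getkMinIndex distance k)
def Claim_raises_getkMinIndex : Prop := (∀ (distance : List Int) (k : Int), Dom_getkMinIndex distance k → Raises_getkMinIndex distance k → ¬ Pre_getkMinIndex distance k) ∧ (Dom_getkMinIndex (pvRaiseWitness_getkMinIndex.1) (pvRaiseWitness_getkMinIndex.2) ∧ Raises_getkMinIndex (pvRaiseWitness_getkMinIndex.1) (pvRaiseWitness_getkMinIndex.2) ∧ getkMinIndex_alt (pvRaiseWitness_getkMinIndex.1) (pvRaiseWitness_getkMinIndex.2) = pvRaiseWitnessOut_getkMinIndex)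

-- ===== LEMMAS AND PROOFS =====

-- A's loop as a structural recursion on the number of remaining rounds
def aRec : List Int → Nat → List Int
  | _, 0 => []
  | l, n + 1 =>
    match PySem.List.min? l (fun x => x) with
    | none => []
    | some m =>
      match PySem.List.index? l m with
      | none => []
      | some i => (i : Int) :: aRec (l.eraseIdx i) n

-- B's shift loop as a structural recursion carrying the previous picks
def shiftRec : List Int → List Int → List Int
  | _, [] => []
  | prev, p :: ps => (p - (prev.countP (fun q => decide (q < p)) : Int)) :: shiftRec (prev ++ [p]) ps

def pairsOf (l : List Int) : List (Int × Int) := (PySem.List.enumerate l).map (fun p => (p.2, p.1))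

def sPairs (l : List Int) : List (Int × Int) :=
  PySem.List.sorted2 (pairsOf l) (fun p => p.1) (fun p => p.2)

def ordIdx (l : List Int) : List Int := (sPairs l).map (fun p => p.2)

def inc (m q : Int) : Int := if m ≤ q then q + 1 else q

theorem aRec_nil (n : Nat) : aRec [] n = [] := by
  cases n <;> simp [aRec, PySem.List.min?]

theorem foldlA_bridge (rng : List Int) (acc l : List Int) :
    (rng.foldl
      (fun (st : List Int × List Int) _ =>
        match PySem.List.min? st.2 (fun x => x) with
        | none => st
        | some m =>
          match PySem.List.index? st.2 m with
          | none => st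
          | some i => (st.1 ++ [(i : Int)], st.2.eraseIdx i))
      (acc, l)).1 = acc ++ aRec l rng.length := by
  induction rng generalizing acc l with
  | nil => simp [aRec]
  | cons r rs ih =>
    simp only [List.foldl_cons, List.length_cons]
    rcases hm : PySem.List.min? l (fun x => x) with _ | m
    · have hl : l = [] := (PySem.List.min?_eq_none_iff l _).1 hm
      subst hl
      simp only [hm]
      rw [ih, aRec_nil, aRec_nil]
    · have hmem : m ∈ l := PySem.List.min?_mem hm
      rcases hi : PySem.List.index? l m with _ | i
      · exact absurd hmem ((PySem.List.index?_eq_none_iff l m).1 hi)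
      · simp only [PySem.List.index?_eq_idxOf?] at hi
        simp only [hm, hi]
        rw [ih]
        simp [aRec, hm, hi]

theorem pyRange_len (k : Int) : (PySem.List.pyRange 0 k 1).length = k.toNat := by
  simp [PySem.List.pyRange]
  omega

theorem getkMinIndex_eq_aRec (distance : List Int) (k : Int) :
    getkMinIndex distance k = aRec distance k.toNat := by
  unfold getkMinIndex
  rw [foldlA_bridge, pyRange_len, List.nil_append]

def shiftB : List Int → List Int → List Int
  | _, [] => []
  | prev, p :: ps =>
    (p - (bsearch prev p 0 prev.length : Int)) ::
      shiftB (PySem.List.insert prev (bsearch prev p 0 prev.length : Int) p) ps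

theorem foldlB_bridge (ps acc prev : List Int) :
    (ps.foldl
      (fun (st : List Int × List Int) p =>
        let lo := bsearch st.2 p 0 st.2.length
        (st.1 ++ [p - (lo : Int)], PySem.List.insert st.2 (lo : Int) p))
      (acc, prev)).1 = acc ++ shiftB prev ps := by
  induction ps generalizing acc prev with
  | nil => simp [shiftB]
  | cons p ps ih => simp [shiftB, ih]

theorem alt_eq_shiftB (distance : List Int) (k : Int) :
    getkMinIndex_alt distance k = shiftB [] ((ordIdx distance).take k.toNat) := by
  unfold getkMinIndex_alt
  simp only []
  by_cases hk : 0 < k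
  · rw [if_pos hk, PySem.List.slice_to _ (le_of_lt hk), foldlB_bridge, List.nil_append]
    rfl
  · rw [if_neg hk]
    have : k.toNat = 0 := by omega
    rw [this, List.take_zero]
    simp [shiftB]

theorem countP_eq_of_split (l : List Int) (pred : Int → Bool) (c : Nat) (hc : c ≤ l.length)
    (h1 : ∀ j (hj : j < l.length), j < c → pred l[j] = true)
    (h2 : ∀ j (hj : j < l.length), c ≤ j → pred l[j] = false) : l.countP pred = c := by
  induction l generalizing c with
  | nil => simp only [List.length_nil, Nat.le_zero] at hc; subst hc; simp
  | cons x xs ih =>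
    cases c with
    | zero =>
      rw [List.countP_cons, ih 0 (by omega)
        (by omega) (fun j hj _ => h2 (j + 1) (by simpa using Nat.succ_lt_succ hj) (by omega))]
      have h0 := h2 0 (by simp) (by omega)
      simp at h0
      simp [h0]
    | succ c' =>
      rw [List.countP_cons, ih c' (by simpa using hc)
        (fun j hj hjc => h1 (j + 1) (by simpa using Nat.succ_lt_succ hj) (by omega))
        (fun j hj hjc => h2 (j + 1) (by simpa using Nat.succ_lt_succ hj) (by omega))]
      have h0 := h1 0 (by simp) (by omega)
      simp at h0
      simp [h0]

theorem bsearchAux_inv (prev : List Int) (p : Int) (hs : prev.Pairwise (· ≤ ·)) :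
    ∀ (fuel lo hi : Nat), hi - lo ≤ fuel → lo ≤ hi → hi ≤ prev.length →
    (∀ j (hj : j < prev.length), j < lo → prev[j] < p) →
    (∀ j (hj : j < prev.length), hi ≤ j → ¬(prev[j] < p)) →
    bsearchAux prev p fuel lo hi ≤ prev.length ∧
      (∀ j (hj : j < prev.length), j < bsearchAux prev p fuel lo hi → prev[j] < p) ∧
      (∀ j (hj : j < prev.length), bsearchAux prev p fuel lo hi ≤ j → ¬(prev[j] < p)) := by
  intro fuel
  induction fuel with
  | zero =>
    intro lo hi hfuel hlohi hlen h1 h2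
    have : lo = hi := by omega
    subst this
    rw [bsearchAux]
    exact ⟨by omega, h1, h2⟩
  | succ f ih =>
    intro lo hi hfuel hlohi hlen h1 h2
    rw [bsearchAux]
    by_cases hlt : lo < hi
    · rw [if_pos hlt]
      simp only []
      have hmid : (lo + hi) / 2 < hi ∧ lo ≤ (lo + hi) / 2 := by omega
      have hmlen : (lo + hi) / 2 < prev.length := by omega
      have hgetD : prev.getD ((lo + hi) / 2) 0 = prev[(lo + hi) / 2] := List.getD_eq_getElem prev 0 hmlen
      by_cases hcmp : prev.getD ((lo + hi) / 2) 0 < p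
      · rw [if_pos hcmp]
        apply ih ((lo + hi) / 2 + 1) hi (by omega) (by omega) hlen
        · intro j hj hjlo
          rcases Nat.lt_or_ge j lo with hc | hc
          · exact h1 j hj hc
          · calc prev[j] ≤ prev[(lo + hi) / 2] := by
                  rcases Nat.lt_or_ge j ((lo + hi) / 2) with hc2 | hc2
                  · exact List.pairwise_iff_getElem.1 hs j _ hj hmlen hc2
                  · have : j = (lo + hi) / 2 := by omega
                    subst this; exact le_refl _
              _ < p := by rw [← hgetD]; exact hcmp
        · exact h2
      · rw [if_neg hcmp]
        apply ih lo ((lo + hi) / 2) (by omega) (by omega) (by omega) h1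
        intro j hj hjm
        have hle : prev[(lo + hi) / 2] ≤ prev[j] := by
          rcases Nat.lt_or_ge ((lo + hi) / 2) j with hc2 | hc2
          · exact List.pairwise_iff_getElem.1 hs _ j hmlen hj hc2
          · have : j = (lo + hi) / 2 := by omega
            subst this; exact le_refl _
        rw [hgetD] at hcmp
        omega
    · rw [if_neg hlt]
      have : lo = hi := by omega
      subst this
      exact ⟨by omega, h1, h2⟩

theorem bsearch_inv (prev : List Int) (p : Int) (hs : prev.Pairwise (· ≤ ·))
    (lo hi : Nat) (hlohi : lo ≤ hi) (hlen : hi ≤ prev.length)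
    (h1 : ∀ j (hj : j < prev.length), j < lo → prev[j] < p)
    (h2 : ∀ j (hj : j < prev.length), hi ≤ j → ¬(prev[j] < p)) :
    bsearch prev p lo hi ≤ prev.length ∧
      (∀ j (hj : j < prev.length), j < bsearch prev p lo hi → prev[j] < p) ∧
      (∀ j (hj : j < prev.length), bsearch prev p lo hi ≤ j → ¬(prev[j] < p)) :=
  bsearchAux_inv prev p hs (hi - lo) lo hi (le_refl _) hlohi hlen h1 h2

theorem bsearch_eq_countP (prev : List Int) (p : Int) (hs : prev.Pairwise (· ≤ ·)) :
    bsearch prev p 0 prev.length = prev.countP (fun q => decide (q < p)) := by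
  obtain ⟨hle, h1, h2⟩ := bsearch_inv prev p hs 0 prev.length (by omega)
    (le_refl _) (by omega) (by intro j hj hj2; omega)
  exact (countP_eq_of_split prev _ _ hle
    (fun j hj hjc => by simpa using h1 j hj hjc)
    (fun j hj hjc => by simpa using h2 j hj hjc)).symm

theorem insertIdx_take_drop (v : Int) : ∀ (xs : List Int) (r : Nat), r ≤ xs.length →
    xs.insertIdx r v = List.take r xs ++ v :: List.drop r xs
  | xs, 0, _ => by simp [List.insertIdx]
  | [], r + 1, h => by simp at h
  | x :: t, r + 1, h => by
    simp only [List.insertIdx_succ_cons, List.take_succ_cons, List.drop_succ_cons, List.cons_append]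
    rw [insertIdx_take_drop v t r (by simpa using h)]

theorem insert_eq_insertIdx (xs : List Int) (r : Nat) (v : Int) (h : r ≤ xs.length) :
    PySem.List.insert xs (r : Int) v = xs.insertIdx r v := by
  simp only [PySem.List.insert, PySem.List.sliceIndices]
  have h1 : (min (r : Int) (if (1:Int) < 0 then (xs.length : Int) - 1 else (xs.length : Int))).toNat = r := by
    rw [if_neg (by omega)]; omega
  rw [if_neg (by omega), h1]
  exact (insertIdx_take_drop v xs r h).symm

theorem pairwise_le_insertIdx (prev : List Int) (p : Int) (r : Nat) (hr : r ≤ prev.length)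
    (hs : prev.Pairwise (· ≤ ·))
    (h1 : ∀ j (hj : j < prev.length), j < r → prev[j] < p)
    (h2 : ∀ j (hj : j < prev.length), r ≤ j → ¬(prev[j] < p)) :
    (prev.insertIdx r p).Pairwise (· ≤ ·) := by
  rw [insertIdx_take_drop p prev r hr, List.pairwise_append]
  refine ⟨List.Pairwise.sublist (List.take_sublist r prev) hs, ?_, ?_⟩
  · rw [List.pairwise_cons]
    refine ⟨?_, List.Pairwise.sublist (List.drop_sublist r prev) hs⟩
    intro b hb
    obtain ⟨j, hj, rfl⟩ := List.mem_iff_getElem.1 hb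
    rw [List.getElem_drop]
    have hlen : r + j < prev.length := by
      have := hj; simp [List.length_drop] at this; omega
    have := h2 (r + j) hlen (by omega)
    omega
  · intro a ha b hb
    obtain ⟨j, hj, rfl⟩ := List.mem_iff_getElem.1 ha
    rw [List.getElem_take]
    have hjlen : j < prev.length := by
      have := hj; simp [List.length_take] at this; omega
    have hjr : j < r := by
      have := hj; simp [List.length_take] at this; omega
    have halt : prev[j] < p := h1 j hjlen hjr
    rcases List.mem_cons.1 hb with rfl | hb2
    · omega
    · obtain ⟨j2, hj2, rfl⟩ := List.mem_iff_getElem.1 hb2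
      rw [List.getElem_drop]
      have hlen2 : r + j2 < prev.length := by
        have := hj2; simp [List.length_drop] at this; omega
      have := h2 (r + j2) hlen2 (by omega)
      omega

theorem shiftB_eq_shiftRec (ps : List Int) : ∀ prev prev0,
    prev.Perm prev0 → prev.Pairwise (· ≤ ·) → shiftB prev ps = shiftRec prev0 ps := by
  induction ps with
  | nil => intro prev prev0 _ _; simp [shiftB, shiftRec]
  | cons p ps ih =>
    intro prev prev0 hperm hs
    obtain ⟨hle, h1, h2⟩ := bsearch_inv prev p hs 0 prev.length (by omega)
      (le_refl _) (by omega) (by intro j hj hj2; omega)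
    have hcnt : bsearch prev p 0 prev.length = prev0.countP (fun q => decide (q < p)) := by
      rw [bsearch_eq_countP prev p hs]
      exact hperm.countP_eq _
    simp only [shiftB, shiftRec]
    congr 1
    · rw [hcnt]
    · rw [insert_eq_insertIdx prev _ p hle]
      apply ih
      · exact ((List.perm_insertIdx p prev hle).trans (hperm.cons p)).trans
          (List.perm_append_singleton p prev0).symm
      · exact pairwise_le_insertIdx prev p _ hle hs h1 h2

theorem sorted2_eq_sorted_lex (xs : List (Int × Int)) :
    PySem.List.sorted2 xs (fun p => p.1) (fun p => p.2) =
      PySem.List.sorted xs (fun p => toLex p) := by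
  have h : (fun (a b : Int × Int) => decide (a.1 < b.1) || (!decide (b.1 < a.1) && decide (a.2 < b.2)))
      = fun (a b : Int × Int) => decide (toLex a < toLex b) := by
    funext a b
    rcases lt_trichotomy a.1 b.1 with h | h | h <;>
      simp [Prod.Lex.lt_iff, h, lt_asymm]
  simp [PySem.List.sorted2, PySem.List.sorted, h]

theorem enumerate_shift (xs : List Int) (s : Int) :
    (PySem.List.enumerate xs s).map (fun p => (p.1 + 1, p.2)) = PySem.List.enumerate xs (s + 1) := by
  induction xs generalizing s with
  | nil => simp [PySem.List.enumerate]
  | cons x xs ih => simp [PySem.List.enumerate_cons, ih]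


def pairsAt (xs : List Int) (s : Int) : List (Int × Int) :=
  (PySem.List.enumerate xs s).map (fun p => (p.2, p.1))

theorem pairsOf_eq_pairsAt (l : List Int) : pairsOf l = pairsAt l 0 := rfl

theorem pairsAt_append (xs ys : List Int) (s : Int) :
    pairsAt (xs ++ ys) s = pairsAt xs s ++ pairsAt ys (s + xs.length) := by
  simp [pairsAt, PySem.List.enumerate_append]

theorem pairsAt_cons (x : Int) (xs : List Int) (s : Int) :
    pairsAt (x :: xs) s = (x, s) :: pairsAt xs (s + 1) := by
  simp [pairsAt, PySem.List.enumerate_cons]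

theorem mem_pairsAt (xs : List Int) (s : Int) (p : Int × Int) :
    p ∈ pairsAt xs s ↔ ∃ k, ∃ _ : k < xs.length, p = (xs[k], s + k) := by
  unfold pairsAt
  constructor
  · intro hp
    obtain ⟨q, hq, hqe⟩ := List.mem_map.1 hp
    obtain ⟨k, hk, hke⟩ := (PySem.List.mem_enumerate_iff xs s q).1 hq
    exact ⟨k, hk, by rw [← hqe, hke]⟩
  · rintro ⟨k, hk, rfl⟩
    exact List.mem_map.2 ⟨(s + k, xs[k]), (PySem.List.mem_enumerate_iff xs s _).2 ⟨k, hk, rfl⟩, rfl⟩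

theorem map_inc_pairsAt_lo (xs : List Int) (s t : Int) (h : s + xs.length ≤ t) :
    (pairsAt xs s).map (fun p => (p.1, inc t p.2)) = pairsAt xs s := by
  rw [List.map_congr_left (g := id), List.map_id]
  intro a ha
  obtain ⟨k, hk, rfl⟩ := (mem_pairsAt xs s a).1 ha
  simp only [inc, id]
  rw [if_neg (by omega)]

theorem map_inc_pairsAt_hi (xs : List Int) (s t : Int) (h : t ≤ s) :
    (pairsAt xs s).map (fun p => (p.1, inc t p.2)) = pairsAt xs (s + 1) := by
  unfold pairsAt
  rw [← enumerate_shift, List.map_map, List.map_map]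
  apply List.map_congr_left
  intro q hq
  obtain ⟨k, hk, rfl⟩ := (PySem.List.mem_enumerate_iff xs s q).1 hq
  simp only [Function.comp, inc]
  rw [if_pos (by omega)]

theorem pairwise_snd_lt_pairsAt (xs : List Int) (s : Int) :
    (pairsAt xs s).Pairwise (fun a b => a.2 < b.2) := by
  unfold pairsAt
  rw [List.pairwise_map]
  exact PySem.List.pairwise_lt_enumerate xs s

theorem inc_lex_mono (t : Int) (a b : Int × Int) (h : toLex a < toLex b) :
    toLex (a.1, inc t a.2) < toLex (b.1, inc t b.2) := by
  obtain ⟨a1, a2⟩ := a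
  obtain ⟨b1, b2⟩ := b
  rw [Prod.Lex.lt_iff] at h ⊢
  simp only [inc, ofLex_toLex] at h ⊢
  rcases h with h | ⟨h1, h2⟩
  · exact Or.inl h
  · refine Or.inr ⟨h1, ?_⟩
    split_ifs <;> omega

theorem sorted_lex_pairwise_lt (xs : List Int) (s : Int) :
    (PySem.List.sorted (pairsAt xs s) (fun p => toLex p)).Pairwise
      (fun a b => toLex a < toLex b) := by
  have hle := PySem.List.sorted_pairwise (pairsAt xs s) (fun p => toLex p)
  have hperm : (PySem.List.sorted (pairsAt xs s) (fun p => toLex p)).Perm (pairsAt xs s) :=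
    PySem.List.sorted_perm _ _ _
  have hnd : ((PySem.List.sorted (pairsAt xs s) (fun p => toLex p)).map (fun p => p.2)).Nodup := by
    apply List.Perm.nodup (l := (pairsAt xs s).map (fun p => p.2))
    · exact (hperm.map _).symm
    · rw [List.nodup_iff_pairwise_ne, List.pairwise_map]
      exact (pairwise_snd_lt_pairsAt xs s).imp (fun h => ne_of_lt h)
  rw [List.nodup_iff_pairwise_ne, List.pairwise_map] at hnd
  exact (hle.and hnd).imp (fun {a b} ⟨h1, h2⟩ => by
    rcases (Prod.Lex.le_iff).1 h1 with h | ⟨he, hle2⟩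
    · exact Prod.Lex.lt_iff.2 (Or.inl h)
    · exact Prod.Lex.lt_iff.2 (Or.inr ⟨he, lt_of_le_of_ne hle2 h2⟩))

theorem sPairs_cons_structure (l : List Int) (m : Int) (i : Nat)
    (hm : PySem.List.min? l (fun x => x) = some m)
    (hi : PySem.List.index? l m = some i) :
    sPairs l = (m, (i : Int)) :: (sPairs (l.eraseIdx i)).map (fun p => (p.1, inc (i : Int) p.2)) := by
  obtain ⟨pre, suf, hl, hlen, hnotm⟩ := (PySem.List.index?_eq_some_iff l m i).1 hi
  subst hl
  subst hlen
  have herase : (pre ++ m :: suf).eraseIdx pre.length = pre ++ suf := by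
    rw [List.eraseIdx_append]; simp
  rw [herase]
  unfold sPairs
  rw [sorted2_eq_sorted_lex, sorted2_eq_sorted_lex, pairsOf_eq_pairsAt, pairsOf_eq_pairsAt]
  set t : Int := (pre.length : Int) with ht
  set S' := PySem.List.sorted (pairsAt (pre ++ suf) 0) (fun p => toLex p) with hS'
  have hsplit : pairsAt (pre ++ suf) 0 = pairsAt pre 0 ++ pairsAt suf t := by
    rw [pairsAt_append]; norm_num; rfl
  have htarget : pairsAt (pre ++ m :: suf) 0 = pairsAt pre 0 ++ (m, t) :: pairsAt suf (t + 1) := by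
    rw [pairsAt_append, pairsAt_cons]; norm_num; exact ⟨rfl, rfl⟩
  apply PySem.List.sorted_eq_of_perm_of_pairwise_lt
  · -- permutation
    have hmap : ((S').map (fun p => (p.1, inc t p.2))).Perm
        ((pairsAt (pre ++ suf) 0).map (fun p => (p.1, inc t p.2))) :=
      (PySem.List.sorted_perm _ _ _).map _
    have hmapped : (pairsAt (pre ++ suf) 0).map (fun p => (p.1, inc t p.2))
        = pairsAt pre 0 ++ pairsAt suf (t + 1) := by
      rw [hsplit, List.map_append, map_inc_pairsAt_lo pre 0 t (by omega),
        map_inc_pairsAt_hi suf t t (le_refl t)]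
    rw [htarget]
    refine List.Perm.trans ((hmap.trans (by rw [hmapped])).cons (m, t)) ?_
    exact List.perm_middle.symm
  · -- pairwise strict lex order
    rw [List.pairwise_cons]
    constructor
    · intro b hb
      obtain ⟨a, ha, rfl⟩ := List.mem_map.1 hb
      have hamem : a ∈ pairsAt (pre ++ suf) 0 := by
        rw [← PySem.List.mem_sorted (pairsAt (pre ++ suf) 0) (fun p => toLex p) false a]
        exact ha
      rw [hsplit, List.mem_append] at hamem
      rcases hamem with hc | hc
      · obtain ⟨j, hj, rfl⟩ := (mem_pairsAt pre 0 a).1 hc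
        have hmem2 : pre[j] ∈ pre ++ m :: suf := List.mem_append_left _ (List.getElem_mem hj)
        have hle : m ≤ pre[j] := PySem.List.min?_isMin hm _ hmem2
        have hne : m ≠ pre[j] := fun h => hnotm (h ▸ List.getElem_mem hj)
        rw [Prod.Lex.lt_iff]
        simp only [ofLex_toLex]
        exact Or.inl (lt_of_le_of_ne hle hne)
      · obtain ⟨j, hj, rfl⟩ := (mem_pairsAt suf t a).1 hc
        have hmem2 : suf[j] ∈ pre ++ m :: suf :=
          List.mem_append_right _ (List.mem_cons_of_mem _ (List.getElem_mem hj))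
        have hle : m ≤ suf[j] := PySem.List.min?_isMin hm _ hmem2
        rw [Prod.Lex.lt_iff]
        simp only [ofLex_toLex, inc]
        rcases lt_or_eq_of_le hle with h | h
        · exact Or.inl h
        · refine Or.inr ⟨h, ?_⟩
          rw [if_pos (by omega)]
          omega
    · rw [List.pairwise_map]
      exact (sorted_lex_pairwise_lt (pre ++ suf) 0).imp (fun {a b} h => inc_lex_mono t a b h)

theorem ordIdx_cons (l : List Int) (m : Int) (i : Nat)
    (hm : PySem.List.min? l (fun x => x) = some m)
    (hi : PySem.List.index? l m = some i) :
    ordIdx l = (i : Int) :: (ordIdx (l.eraseIdx i)).map (inc (i : Int)) := by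
  unfold ordIdx
  rw [sPairs_cons_structure l m i hm hi]
  simp [List.map_map, Function.comp]

theorem inc_def (t : Int) : inc t = fun q => if t ≤ q then q + 1 else q := rfl

theorem shiftRec_inc (i₀ : Int) (ps : List Int) : ∀ prev,
    shiftRec (i₀ :: prev.map (inc i₀)) (ps.map (inc i₀)) = shiftRec prev ps := by
  simp only [inc_def]
  induction ps with
  | nil => intro prev; simp [shiftRec]
  | cons p ps ih =>
    intro prev
    simp only [List.map_cons, shiftRec]
    congr 1
    · rw [List.countP_cons, List.countP_map]
      have h2 : List.countP ((fun q => decide (q < if i₀ ≤ p then p + 1 else p)) ∘ (fun q => if i₀ ≤ q then q + 1 else q)) prev = List.countP (fun q => decide (q < p)) prev := by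
        apply List.countP_congr
        intro a _
        by_cases h1 : i₀ ≤ a <;> by_cases h2 : i₀ ≤ p <;> simp [h1, h2] <;> omega
      rw [h2]
      split_ifs with hA hB hB <;> simp_all <;> push_cast <;> omega
    · have h3 : (i₀ :: prev.map (fun q => if i₀ ≤ q then q + 1 else q)) ++ [if i₀ ≤ p then p + 1 else p]
          = i₀ :: (prev ++ [p]).map (fun q => if i₀ ≤ q then q + 1 else q) := by
        simp
      rw [h3, ih]

theorem aRec_eq_shiftRec (n : Nat) (l : List Int) (hn : n ≤ l.length) :
    aRec l n = shiftRec [] ((ordIdx l).take n) := by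
  induction n generalizing l with
  | zero => simp [aRec, shiftRec]
  | succ n ih =>
    have hne : l ≠ [] := by intro h; subst h; simp at hn
    rcases hm : PySem.List.min? l (fun x => x) with _ | m
    · exact absurd ((PySem.List.min?_eq_none_iff l _).1 hm) hne
    have hmem : m ∈ l := PySem.List.min?_mem hm
    rcases hi : PySem.List.index? l m with _ | i
    · exact absurd hmem ((PySem.List.index?_eq_none_iff l m).1 hi)
    have hlt : i < l.length := by
      obtain ⟨pre, suf, hl, hlen, _⟩ := (PySem.List.index?_eq_some_iff l m i).1 hi
      subst hl; simp [← hlen]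
    have hstep : aRec l (n + 1) = (i : Int) :: aRec (l.eraseIdx i) n := by
      simp only [PySem.List.index?_eq_idxOf?] at hi
      simp [aRec, hm, hi]
    rw [hstep, ordIdx_cons l m i hm hi, List.take_succ_cons, ← List.map_take]
    have hh : shiftRec [] ((i : Int) :: ((ordIdx (l.eraseIdx i)).take n).map (inc (i : Int)))
        = (i : Int) :: shiftRec [] ((ordIdx (l.eraseIdx i)).take n) := by
      have h5 := shiftRec_inc (i : Int) ((ordIdx (l.eraseIdx i)).take n) []
      simp only [List.map_nil] at h5
      simp only [shiftRec, List.countP_nil, List.nil_append, Nat.cast_zero, sub_zero]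
      rw [h5]
    rw [hh, ih (l.eraseIdx i) (by rw [List.length_eraseIdx_of_lt hlt]; omega)]

-- ===== VERDICT (by name: the statement is the Claim_ definition above) =====
theorem getkMinIndex_spec : Claim_equal_getkMinIndex := by
  intro distance k _ hpre
  unfold Spec_getkMinIndex
  rw [getkMinIndex_eq_aRec, alt_eq_shiftB,
    shiftB_eq_shiftRec ((ordIdx distance).take k.toNat) [] [] (List.Perm.refl []) (List.Pairwise.nil),
    aRec_eq_shiftRec]
  unfold Pre_getkMinIndex at hpre
  omega

@[simp] theorem getkMinIndex_raises : Claim_raises_getkMinIndex := by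
  unfold Claim_raises_getkMinIndex
  exact ⟨by intro distance k _ hr hp; unfold Raises_getkMinIndex at hr; unfold Pre_getkMinIndex at hp; omega, by decide⟩
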